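-- pv_equiv track=rewrite | github.com/MawuliAgamah/fram | swarm/analytics/heatmap.py | flow_rate_at_exits
-- ===== SOURCE A (Python) =====
-- def flow_rate_at_exits(
--     exit_positions: list[tuple[int, int]],
--     agent_positions_per_tick: dict[int, list[tuple[int, int]]],
--     neighborhood: int = 3,
-- ) -> list[tuple[int, int]]:
--     """
--     Compute per-tick flow rate at exit regions.
--
--     Returns list of (tick, agents_near_exits) for throughput analysis.
--     """
--     flow = []
--     for tick in sorted(agent_positions_per_tick.keys()):
--         positions = agent_positions_per_tick[tick]
--         count = 0
--         for px, py in positions: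
--             for ex, ey in exit_positions:
--                 if abs(px - ex) <= neighborhood and abs(py - ey) <= neighborhood:
--                     count += 1
--                     break
--         flow.append((tick, count))
--     return flow
-- ===== SOURCE B (Python) =====
-- def flow_rate_at_exits(
--     exit_positions: list[tuple[int, int]],
--     agent_positions_per_tick: dict[int, list[tuple[int, int]]],
--     neighborhood: int = 3,
-- ) -> list[tuple[int, int]]:
--     """Exit-major sieve: per tick, repeatedly filter out the agents within the
--     neighborhood of each exit; the near-exit count is total minus survivors."""
--     flow = []
--     for tick in sorted(agent_positions_per_tick.keys()):
--         positions = agent_positions_per_tick[tick]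
--         remaining = positions
--         for ex, ey in exit_positions:
--             if not remaining:
--                 break
--             remaining = [(px, py) for (px, py) in remaining
--                          if not (abs(px - ex) <= neighborhood and abs(py - ey) <= neighborhood)]
--         flow.append((tick, len(positions) - len(remaining)))
--     return flow
-- ===== Notes on version B (the rewrite author's own statement) =====
-- stated objective: alternative
-- what changed: Inverts the loop nesting into an exit-major sieve: instead of scanning exits per agent with an early break, B filters the shrinking list of not-yet-matched agents once per exit and reports total minus survivors.
import Mathlib
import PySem

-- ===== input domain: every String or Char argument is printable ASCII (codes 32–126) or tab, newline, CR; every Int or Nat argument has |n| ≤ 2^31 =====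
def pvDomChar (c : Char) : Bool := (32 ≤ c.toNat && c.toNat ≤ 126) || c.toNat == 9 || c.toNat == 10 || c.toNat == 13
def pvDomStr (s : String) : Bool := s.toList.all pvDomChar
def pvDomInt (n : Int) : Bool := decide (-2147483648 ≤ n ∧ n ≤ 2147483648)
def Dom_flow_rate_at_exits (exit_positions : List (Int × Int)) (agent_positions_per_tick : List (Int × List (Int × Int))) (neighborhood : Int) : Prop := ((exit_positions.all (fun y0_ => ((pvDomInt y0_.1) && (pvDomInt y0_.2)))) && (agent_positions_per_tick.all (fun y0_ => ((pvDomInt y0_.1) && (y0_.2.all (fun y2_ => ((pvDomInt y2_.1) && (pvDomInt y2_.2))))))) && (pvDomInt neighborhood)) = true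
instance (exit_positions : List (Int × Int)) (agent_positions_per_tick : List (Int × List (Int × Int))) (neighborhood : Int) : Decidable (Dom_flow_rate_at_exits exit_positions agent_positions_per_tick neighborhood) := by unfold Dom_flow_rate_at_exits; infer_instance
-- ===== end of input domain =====

-- B replaces A's agent-major scan with an early break by an exit-major sieve
-- (filter the not-yet-matched agents per exit; count = total minus survivors).

-- ===== PORT A =====
-- the inner 'for ex, ey in exit_positions: … break' loop of A: true at the first exit
-- within the neighborhood, scanning exits in order
def pvNearAnyExit (exit_positions : List (Int × Int)) (neighborhood px py : Int) : Bool :=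
  match exit_positions with
  | [] => false
  | e :: rest =>
    if |px - e.1| ≤ neighborhood ∧ |py - e.2| ≤ neighborhood then true
    else pvNearAnyExit rest neighborhood px py

def flow_rate_at_exits (exit_positions : List (Int × Int)) (agent_positions_per_tick : List (Int × List (Int × Int))) (neighborhood : Int) : List (Int × Int) :=
  (PySem.List.sorted (PySem.Dict.ofList agent_positions_per_tick).keys (fun k => k) false).foldl
    (fun flow tick =>
      flow ++ [(tick,
        ((PySem.Dict.ofList agent_positions_per_tick).getD tick []).foldl
          (fun count p =>
            if pvNearAnyExit exit_positions neighborhood p.1 p.2 then count + 1 else count)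
          (0 : Int))])
    []

-- ===== PORT B =====
def flow_rate_at_exits_alt (exit_positions : List (Int × Int)) (agent_positions_per_tick : List (Int × List (Int × Int))) (neighborhood : Int) : List (Int × Int) :=
  (PySem.List.sorted (PySem.Dict.ofList agent_positions_per_tick).keys (fun k => k) false).foldl
    (fun flow tick =>
      flow ++ [(tick,
        (((PySem.Dict.ofList agent_positions_per_tick).getD tick []).length : Int)
          - ((exit_positions.foldl
              (fun remaining e =>
                if remaining = [] then remaining
                else
                  remaining.filter
                    (fun p => !(decide (|p.1 - e.1| ≤ neighborhood ∧ |p.2 - e.2| ≤ neighborhood))))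
              ((PySem.Dict.ofList agent_positions_per_tick).getD tick [])).length : Int))])
    []

-- ===== PRECONDITION & SPEC =====
def Spec_flow_rate_at_exits (exit_positions : List (Int × Int)) (agent_positions_per_tick : List (Int × List (Int × Int))) (neighborhood : Int) (out : List (Int × Int)) : Prop := out = flow_rate_at_exits_alt exit_positions agent_positions_per_tick neighborhood
instance (exit_positions : List (Int × Int)) (agent_positions_per_tick : List (Int × List (Int × Int))) (neighborhood : Int) (out : List (Int × Int)) : Decidable (Spec_flow_rate_at_exits exit_positions agent_positions_per_tick neighborhood out) := by unfold Spec_flow_rate_at_exits; infer_instance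

-- ===== CLAIM (what is proved, stated in full; the proofs are below) =====
def Claim_equal_flow_rate_at_exits : Prop := ∀ (exit_positions : List (Int × Int)) (agent_positions_per_tick : List (Int × List (Int × Int))) (neighborhood : Int), Dom_flow_rate_at_exits exit_positions agent_positions_per_tick neighborhood → Spec_flow_rate_at_exits exit_positions agent_positions_per_tick neighborhood (flow_rate_at_exits exit_positions agent_positions_per_tick neighborhood)

-- ===== LEMMAS AND PROOFS =====

-- A's break-loop helper is List.any over the exits
theorem pvNearAnyExit_eq_any (ex : List (Int × Int)) (nb px py : Int) :
    pvNearAnyExit ex nb px py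
      = ex.any (fun e => decide (|px - e.1| ≤ nb ∧ |py - e.2| ≤ nb)) := by
  induction ex with
  | nil => rfl
  | cons e rest ih =>
    simp only [pvNearAnyExit, List.any_cons]
    by_cases h : |px - e.1| ≤ nb ∧ |py - e.2| ≤ nb
    · simp [h]
    · simp [h, ih]

-- B's sequence of per-exit filters is one filter by "near no exit"
theorem foldl_filter_eq_filter_any (ex : List (Int × Int)) (nb : Int)
    (ps : List (Int × Int)) :
    ex.foldl
        (fun remaining e =>
          remaining.filter (fun p => !(decide (|p.1 - e.1| ≤ nb ∧ |p.2 - e.2| ≤ nb))))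
        ps
      = ps.filter (fun p => !(ex.any (fun e => decide (|p.1 - e.1| ≤ nb ∧ |p.2 - e.2| ≤ nb)))) := by
  induction ex generalizing ps with
  | nil => simp
  | cons e rest ih =>
    rw [List.foldl_cons, ih, List.filter_filter]
    congr 1
    funext p
    simp only [List.any_cons, Bool.not_or, Bool.and_comm]

-- survivors of the sieve: length ps - countP near = length of the filtered list
theorem length_filter_not (p : (Int × Int) → Bool) (ps : List (Int × Int)) :
    (ps.filter (fun x => !(p x))).length = ps.length - ps.countP p := by
  have h := List.length_eq_length_filter_add (l := ps) p
  rw [List.countP_eq_length_filter]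
  omega

-- B's 'if not remaining: break' is sound: filtering an empty worklist is a no-op
theorem foldl_filter_break_eq (ex : List (Int × Int)) (nb : Int) (ps : List (Int × Int)) :
    ex.foldl
        (fun remaining e =>
          if remaining = [] then remaining
          else
            remaining.filter
              (fun p => !(decide (|p.1 - e.1| ≤ nb ∧ |p.2 - e.2| ≤ nb))))
        ps
      = ex.foldl
          (fun remaining e =>
            remaining.filter (fun p => !(decide (|p.1 - e.1| ≤ nb ∧ |p.2 - e.2| ≤ nb))))
          ps := by
  congr 1
  funext remaining e
  rcases remaining with _ | _ <;> simp

-- per-tick agreement: A's break-counting loop equals B's total-minus-survivors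
theorem tick_count (ex : List (Int × Int)) (nb : Int) (ps : List (Int × Int)) :
    ps.foldl (fun count p => if pvNearAnyExit ex nb p.1 p.2 then count + 1 else count) (0 : Int)
      = (ps.length : Int)
          - ((ex.foldl
              (fun remaining e =>
                if remaining = [] then remaining
                else
                  remaining.filter
                    (fun p => !(decide (|p.1 - e.1| ≤ nb ∧ |p.2 - e.2| ≤ nb))))
              ps).length : Int) := by
  rw [PySem.List.foldl_count_if (fun p => pvNearAnyExit ex nb p.1 p.2) ps 0, zero_add,
    foldl_filter_break_eq, foldl_filter_eq_filter_any,
    length_filter_not (fun p => ex.any (fun e => decide (|p.1 - e.1| ≤ nb ∧ |p.2 - e.2| ≤ nb)))]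
  have hcount : ps.countP (fun p => pvNearAnyExit ex nb p.1 p.2)
      = ps.countP (fun p => ex.any (fun e => decide (|p.1 - e.1| ≤ nb ∧ |p.2 - e.2| ≤ nb))) := by
    congr 1
    funext p
    rw [pvNearAnyExit_eq_any]
  have hle : ps.countP (fun p => ex.any (fun e => decide (|p.1 - e.1| ≤ nb ∧ |p.2 - e.2| ≤ nb)))
      ≤ ps.length := List.countP_le_length
  rw [hcount]
  omega

-- ===== VERDICT (by name: the statement is the Claim_ definition above) =====
theorem flow_rate_at_exits_spec : Claim_equal_flow_rate_at_exits := by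
  intro exit_positions agent_positions_per_tick neighborhood _
  unfold Spec_flow_rate_at_exits flow_rate_at_exits flow_rate_at_exits_alt
  congr 1
  funext flow tick
  rw [tick_count]
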